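-- pv_equiv track=rewrite | github.com/kaikai0307/MMIP-HW2 | test.py | build_q_list
-- ===== SOURCE A (Python) =====
-- def build_q_list(base_q, levels):
--     q_list = []
--     q = base_q
--     for _ in range(levels):
--         q = max(1, int(q))
--         if q_list and q == q_list[-1]:
--             break
--         q_list.append(q)
--         q = q // 2
--     return q_list
-- ===== SOURCE B (Python) =====
-- def build_q_list(base_q, levels):
--     if levels <= 0:
--         return []
--     v0 = max(1, int(base_q))
--     n = min(levels, v0.bit_length())
--     return [v0 >> i for i in range(n)]
-- ===== Notes on version B (the rewrite author's own statement) =====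
-- stated objective: simpler
-- what changed: Replaces A's halve-and-break-on-repeat loop that appends element by element with a closed-form length min(levels, bit_length(max(1,base_q))) and a direct shift comprehension, removing the loop state and duplicate-detection break.
import Mathlib
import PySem

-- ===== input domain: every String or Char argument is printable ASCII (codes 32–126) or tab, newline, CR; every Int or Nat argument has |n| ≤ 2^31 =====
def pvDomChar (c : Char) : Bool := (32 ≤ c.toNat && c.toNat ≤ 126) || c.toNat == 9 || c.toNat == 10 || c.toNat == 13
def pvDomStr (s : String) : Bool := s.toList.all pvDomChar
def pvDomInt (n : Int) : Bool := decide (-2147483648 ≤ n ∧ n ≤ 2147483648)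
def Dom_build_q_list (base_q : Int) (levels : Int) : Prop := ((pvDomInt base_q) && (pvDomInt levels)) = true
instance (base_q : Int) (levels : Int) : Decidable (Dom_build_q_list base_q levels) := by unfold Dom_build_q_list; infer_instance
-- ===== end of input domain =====

-- B replaces A's halve-and-break-on-repeat loop with a closed-form list length
-- (min levels (bit_length of the clamped start)) and a direct shift comprehension
-- (objective: simpler/alternative decomposition; same asymptotic cost).

-- ===== PORT A =====
-- the for-loop of A: fuel = remaining iterations, state = (q_list, q); the
-- `break` is the early return of q_list.  `int(q)` is the identity on Int.
def buildALoop (fuel : Nat) (q_list : List Int) (q : Int) : List Int :=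
  match fuel with
  | 0 => q_list
  | fuel + 1 =>
    let q1 : Int := max 1 q
    if q_list ≠ [] ∧ q_list.getLast? = some q1 then q_list
    else buildALoop fuel (q_list ++ [q1]) (PySem.Int.floordiv q1 2)

def build_q_list (base_q : Int) (levels : Int) : List Int :=
  buildALoop levels.toNat [] base_q

-- ===== PORT B =====
def build_q_list_alt (base_q : Int) (levels : Int) : List Int :=
  if levels ≤ 0 then []
  else
    let v0 : Int := max 1 base_q
    let n : Int := min levels ((PySem.Int.bitLength v0 : Nat) : Int)
    (List.range n.toNat).map (fun i => ((v0.toNat >>> i : Nat) : Int))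

-- ===== PRECONDITION & SPEC =====
def Spec_build_q_list (base_q : Int) (levels : Int) (out : List Int) : Prop := out = build_q_list_alt base_q levels
instance (base_q : Int) (levels : Int) (out : List Int) : Decidable (Spec_build_q_list base_q levels out) := by unfold Spec_build_q_list; infer_instance

-- ===== CLAIM (what is proved, stated in full; the proofs are below) =====
def Claim_equal_build_q_list : Prop := ∀ (base_q : Int) (levels : Int), Dom_build_q_list base_q levels → Spec_build_q_list base_q levels (build_q_list base_q levels)

-- ===== LEMMAS AND PROOFS =====

lemma bl_pos (v : Nat) (hv : 0 < v) : 0 < PySem.Int.bitLength (v : Int) := by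
  rw [PySem.Int.bitLength_natCast hv]; omega

lemma fd_two (v : Nat) : PySem.Int.floordiv (v : Int) 2 = ((v / 2 : Nat) : Int) := by
  rw [PySem.Int.floordiv_eq_ediv_of_pos (by norm_num)]; omega

-- the steady state of A's loop: the list ends in ↑v (v ≥ 1) and q = v // 2;
-- the loop appends exactly min fuel (bit_length v - 1) further halvings.
lemma aLoop_run (k : Nat) : ∀ (v : Nat) (acc : List Int), 0 < v →
    buildALoop k (acc ++ [(v : Int)]) (PySem.Int.floordiv (v : Int) 2)
      = (acc ++ [(v : Int)])
        ++ (List.range (min k (PySem.Int.bitLength (v : Int) - 1))).map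
            (fun i => ((v / 2 ^ (i + 1) : Nat) : Int)) := by
  induction k with
  | zero => intro v acc _; simp [buildALoop]
  | succ k ih =>
    intro v acc hv
    rw [fd_two]
    by_cases hv1 : v = 1
    · subst hv1
      simp [buildALoop]
      decide
    · have hv2 : 2 ≤ v := by omega
      have hhalf : 0 < v / 2 := by omega
      have hmax : max (1 : Int) ((v / 2 : Nat) : Int) = ((v / 2 : Nat) : Int) := by omega
      have hne : ((v / 2 : Nat) : Int) ≠ ((v : Int)) := by
        have : v / 2 < v := by omega
        omega
      have hbreak : ¬ ((acc ++ [(v : Int)]) ≠ [] ∧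
          (acc ++ [(v : Int)]).getLast? = some ((v / 2 : Nat) : Int)) := by
        rintro ⟨-, h⟩
        rw [List.getLast?_concat] at h
        exact hne (Option.some.inj h).symm
      rw [buildALoop]
      simp only [hmax, if_neg hbreak]
      rw [ih (v / 2) (acc ++ [(v : Int)]) hhalf]
      have hbl : PySem.Int.bitLength (v : Int) = PySem.Int.bitLength ((v / 2 : Nat) : Int) + 1 :=
        PySem.Int.bitLength_natCast hv
      have hblh := bl_pos (v / 2) hhalf
      have hmin : min (k + 1) (PySem.Int.bitLength (v : Int) - 1)
          = min k (PySem.Int.bitLength ((v / 2 : Nat) : Int) - 1) + 1 := by omega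
      rw [hmin, List.range_succ_eq_map]
      simp only [List.map_cons, List.map_map, List.append_assoc,
        List.cons_append, List.nil_append, zero_add, pow_one]
      have hfun : List.map (fun i => ((v / 2 / 2 ^ (i + 1) : Nat) : Int))
            (List.range (min k (PySem.Int.bitLength ((v / 2 : Nat) : Int) - 1)))
          = List.map ((fun i => ((v / 2 ^ (i + 1) : Nat) : Int)) ∘ Nat.succ)
            (List.range (min k (PySem.Int.bitLength ((v / 2 : Nat) : Int) - 1))) := by
        apply List.map_congr_left
        intro i _
        simp only [Function.comp_apply]
        congr 1
        rw [Nat.div_div_eq_div_mul]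
        congr 1
        rw [Nat.succ_eq_add_one]
        ring
      rw [hfun]

theorem build_q_list_spec_aux (base_q levels : Int) :
    build_q_list base_q levels = build_q_list_alt base_q levels := by
  by_cases hl : levels ≤ 0
  · have h0 : levels.toNat = 0 := by omega
    simp [build_q_list, build_q_list_alt, h0, hl, buildALoop]
  · have hlpos : 0 < levels := by omega
    obtain ⟨m, hm⟩ : ∃ m : Nat, levels.toNat = m + 1 := ⟨levels.toNat - 1, by omega⟩
    have hcast : (max 1 base_q : Int) = (((max 1 base_q).toNat : Nat) : Int) := by omega
    have hv0pos : 0 < (max 1 base_q).toNat := by omega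
    have hnobreak : ¬ (([] : List Int) ≠ [] ∧
        ([] : List Int).getLast? = some (max (1 : Int) base_q)) := by simp
    rw [build_q_list, build_q_list_alt, if_neg hl, hm, buildALoop]
    simp only [if_neg hnobreak]
    rw [hcast]
    rw [aLoop_run m (max 1 base_q).toNat [] hv0pos]
    have hbl := bl_pos (max 1 base_q).toNat hv0pos
    have hn : (min levels ((PySem.Int.bitLength (((max 1 base_q).toNat : Nat) : Int) : Nat) : Int)).toNat
        = min m (PySem.Int.bitLength (((max 1 base_q).toNat : Nat) : Int) - 1) + 1 := by
      omega
    rw [hn, List.range_succ_eq_map]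
    simp only [List.map_cons, List.map_map, List.nil_append, Int.toNat_natCast,
      Nat.shiftRight_zero, List.singleton_append]
    congr 1
    apply List.map_congr_left
    intro i _
    simp only [Function.comp_apply]
    rw [Nat.shiftRight_eq_div_pow]

-- ===== VERDICT (by name: the statement is the Claim_ definition above) =====
theorem build_q_list_spec : Claim_equal_build_q_list := by
  intro base_q levels _
  exact build_q_list_spec_aux base_q levels
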